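-- pv_equiv track=rewrite | github.com/victorporto2830/lfa_trabalhopratico1_20222 | main.py | Validado
-- ===== SOURCE A (Python) =====
-- def Validado(alfabeto, estados, EstadoFinal, regras):
--   #Se nao tiver estados
-- 	if len(estados[0]) == 0:
-- 		return False
--   #Loop na lista estados
-- 	for estado in EstadoFinal:
--     #Se nao existir o estado final na lista
-- 		if estado not in estados:
-- 			return False
--   #loop para testar regras
-- 	for regra in regras:
-- 		RegraEstadoEntrada, RegraLetra, RegraEstadoSaida = regra
--     #Se a regra de entrada nao existir
-- 		if RegraEstadoEntrada not in estados:
-- 			return False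
--     #Se a regra de saida nao existir
-- 		if RegraEstadoSaida not in estados:
-- 			return False
-- 	return True
-- ===== SOURCE B (Python) =====
-- def Validado(alfabeto, estados, EstadoFinal, regras):
--     if len(estados[0]) == 0:
--         return False
--     needed = set(EstadoFinal)
--     for entrada, letra, saida in regras:
--         needed.add(entrada)
--         needed.add(saida)
--     req = sorted(needed)
--     sts = sorted(set(estados))
--     # two-pointer merge over the two sorted, duplicate-free lists
--     i = 0
--     for r in req:
--         while i < len(sts) and sts[i] < r:
--             i += 1
--         if i == len(sts) or sts[i] != r:
--             return False
--     return True
-- ===== Notes on version B (the rewrite author's own statement) =====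
-- stated objective: alternative
-- what changed: Instead of scanning the state list once per requirement with early returns, B sorts the deduplicated required states (finals plus rule entry/exit states) and the deduplicated state list, then verifies containment with a single two-pointer merge scan.
import Mathlib
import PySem

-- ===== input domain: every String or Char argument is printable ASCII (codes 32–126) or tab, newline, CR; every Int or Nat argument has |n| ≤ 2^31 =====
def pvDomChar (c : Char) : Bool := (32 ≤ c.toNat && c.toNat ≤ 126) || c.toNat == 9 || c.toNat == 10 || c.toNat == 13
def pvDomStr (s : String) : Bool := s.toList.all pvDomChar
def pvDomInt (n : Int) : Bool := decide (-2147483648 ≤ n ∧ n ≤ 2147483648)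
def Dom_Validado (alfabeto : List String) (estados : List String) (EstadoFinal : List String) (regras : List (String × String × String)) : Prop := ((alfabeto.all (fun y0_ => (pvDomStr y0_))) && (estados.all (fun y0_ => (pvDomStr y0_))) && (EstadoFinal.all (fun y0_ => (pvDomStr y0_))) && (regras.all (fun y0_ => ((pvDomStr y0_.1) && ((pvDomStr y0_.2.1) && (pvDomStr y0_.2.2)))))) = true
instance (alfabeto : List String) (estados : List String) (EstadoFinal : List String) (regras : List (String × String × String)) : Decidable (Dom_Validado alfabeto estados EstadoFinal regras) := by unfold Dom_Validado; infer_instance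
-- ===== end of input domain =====

-- B replaces A's per-requirement scans of the state list by sorting the deduplicated
-- required states and the deduplicated state list and one two-pointer merge scan
-- ('alternative' objective; return value only — neither version mutates its arguments).

-- ===== PORT A =====
-- loop 'for regra in regras' with the two early returns
def vLoopRegras (estados : List String) : List (String × String × String) → Bool
  | [] => true
  | (ent, _, sai) :: rest =>
    if ent ∈ estados then
      if sai ∈ estados then vLoopRegras estados rest else false
    else false

-- loop 'for estado in EstadoFinal' with early return False
def vLoopFinais (estados : List String) (regras : List (String × String × String)) : List String → Bool
  | [] => vLoopRegras estados regras
  | e :: rest => if e ∈ estados then vLoopFinais estados regras rest else false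

def Validado (alfabeto : List String) (estados : List String) (EstadoFinal : List String) (regras : List (String × String × String)) : Bool :=
  match estados with
  | [] => false  -- Python raises IndexError here (estados[0]); excluded by Pre_Validado
  | e0 :: _ =>
    if e0.length == 0 then false
    else vLoopFinais estados regras EstadoFinal

-- ===== PORT B =====
-- the 'for r in req' / 'while sts[i] < r' two-pointer loop of Source B, as a merge recursion
def vMerge : List String → List String → Bool
  | [], _ => true
  | _ :: _, [] => false
  | r :: rs, s :: ss =>
    if s < r then vMerge (r :: rs) ss
    else if s = r then vMerge rs (s :: ss)
    else false
  termination_by req sts => (req.length, sts.length)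

def Validado_alt (alfabeto : List String) (estados : List String) (EstadoFinal : List String) (regras : List (String × String × String)) : Bool :=
  match estados with
  | [] => false  -- Python raises IndexError here (estados[0]); excluded by Pre_Validado
  | e0 :: _ =>
    if e0.length == 0 then false
    else
      let needed := regras.foldl (fun s r => PySem.Set.add (PySem.Set.add s r.1) r.2.2)
        (PySem.Set.ofList EstadoFinal)
      let req := PySem.List.sorted needed (fun x => x) false
      let sts := PySem.List.sorted (PySem.Set.ofList estados) (fun x => x) false
      vMerge req sts

-- ===== PRECONDITION & SPEC =====
-- Pre_ excludes only empty 'estados', on which the Python A (and B) raise IndexError at 'estados[0]'.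
def Pre_Validado (alfabeto : List String) (estados : List String) (EstadoFinal : List String) (regras : List (String × String × String)) : Prop := estados ≠ []
instance (alfabeto : List String) (estados : List String) (EstadoFinal : List String) (regras : List (String × String × String)) : Decidable (Pre_Validado alfabeto estados EstadoFinal regras) := by unfold Pre_Validado; infer_instance
def pvWitness_Validado : List String × List String × List String × (List (String × String × String)) :=
  (["a"], ["q0", "q1"], ["q1"], [("q0", "a", "q1")])

def Spec_Validado (alfabeto : List String) (estados : List String) (EstadoFinal : List String) (regras : List (String × String × String)) (out : Bool) : Prop := out = Validado_alt alfabeto estados EstadoFinal regras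
instance (alfabeto : List String) (estados : List String) (EstadoFinal : List String) (regras : List (String × String × String)) (out : Bool) : Decidable (Spec_Validado alfabeto estados EstadoFinal regras out) := by unfold Spec_Validado; infer_instance

-- ===== CLAIM (what is proved, stated in full; the proofs are below) =====
def Claim_equal_Validado : Prop := ∀ (alfabeto : List String) (estados : List String) (EstadoFinal : List String) (regras : List (String × String × String)), Dom_Validado alfabeto estados EstadoFinal regras → Pre_Validado alfabeto estados EstadoFinal regras → Spec_Validado alfabeto estados EstadoFinal regras (Validado alfabeto estados EstadoFinal regras)

-- ===== LEMMAS AND PROOFS =====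

-- A's first loop is the conjunction 'all finals are states' with the second loop's result
theorem vLoopFinais_eq (estados : List String) (regras : List (String × String × String)) (fs : List String) :
    vLoopFinais estados regras fs = (fs.all (fun e => decide (e ∈ estados)) && vLoopRegras estados regras) := by
  induction fs with
  | nil => simp [vLoopFinais]
  | cons e rest ih => by_cases h : e ∈ estados <;> simp [vLoopFinais, h, ih]

-- A's second loop is the conjunction of the per-rule membership tests
theorem vLoopRegras_eq (estados : List String) (rs : List (String × String × String)) :
    vLoopRegras estados rs = rs.all (fun r => decide (r.1 ∈ estados) && decide (r.2.2 ∈ estados)) := by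
  induction rs with
  | nil => rfl
  | cons r rest ih =>
    obtain ⟨ent, letra, sai⟩ := r
    by_cases h1 : ent ∈ estados <;> by_cases h2 : sai ∈ estados <;>
      simp [vLoopRegras, h1, h2, ih]

-- membership in B's accumulated required-states set
theorem mem_needed (rs : List (String × String × String)) (s : PySem.Set String) (x : String) :
    x ∈ rs.foldl (fun s r => PySem.Set.add (PySem.Set.add s r.1) r.2.2) s ↔
      x ∈ s ∨ ∃ r ∈ rs, x = r.1 ∨ x = r.2.2 := by
  induction rs generalizing s with
  | nil => simp
  | cons r rest ih =>
    simp only [List.foldl, ih, PySem.Set.mem_add, List.mem_cons]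
    aesop

-- B's accumulated set stays duplicate-free
theorem nodup_needed (rs : List (String × String × String)) (s : PySem.Set String) (hs : s.Nodup) :
    (rs.foldl (fun s r => PySem.Set.add (PySem.Set.add s r.1) r.2.2) s).Nodup := by
  induction rs generalizing s with
  | nil => exact hs
  | cons r rest ih => exact ih _ (PySem.Set.nodup_add _ _ (PySem.Set.nodup_add _ _ hs))

-- the two-pointer merge over two strictly increasing lists decides containment
theorem vMerge_iff (req sts : List String)
    (hreq : req.Pairwise (· < ·)) (hsts : sts.Pairwise (· < ·)) :
    vMerge req sts = true ↔ ∀ x ∈ req, x ∈ sts := by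
  induction req, sts using vMerge.induct with
  | case1 sts => simp [vMerge]
  | case2 r rs =>
    simp only [vMerge, Bool.false_eq_true, false_iff]
    intro h
    exact absurd (h r List.mem_cons_self) (List.not_mem_nil)
  | case3 r rs s ss hlt ih =>
    rw [List.pairwise_cons] at hsts
    simp only [vMerge, if_pos hlt]
    rw [ih hreq hsts.2]
    constructor
    · intro h x hx
      exact List.mem_cons_of_mem _ (h x hx)
    · intro h x hx
      rcases List.mem_cons.mp (h x hx) with rfl | hm
      · -- x = s impossible: s < r ≤ x since x ∈ r :: rs and r :: rs strictly increasing
        rcases List.mem_cons.mp hx with rfl | hx'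
        · exact absurd hlt (lt_irrefl _)
        · exact absurd (hlt.trans ((List.pairwise_cons.mp hreq).1 _ hx')) (lt_irrefl _)
      · exact hm
  | case4 rs s ss hlt ih =>
    rw [List.pairwise_cons] at hreq
    simp only [vMerge, lt_irrefl, if_false, if_true]
    rw [ih hreq.2 hsts]
    constructor
    · intro h x hx
      rcases List.mem_cons.mp hx with rfl | hx'
      · exact List.mem_cons_self
      · exact h x hx'
    · intro h x hx
      exact h x (List.mem_cons_of_mem _ hx)
  | case5 r rs s ss hlt hne =>
    have hrs : r < s := lt_of_le_of_ne (not_lt.mp hlt) (fun h => hne h.symm)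
    simp only [vMerge, if_neg hlt, if_neg hne, Bool.false_eq_true, false_iff]
    intro h
    have := h r List.mem_cons_self
    rcases List.mem_cons.mp this with rfl | hm
    · exact absurd hrs (lt_irrefl _)
    · exact absurd (hrs.trans ((List.pairwise_cons.mp hsts).1 _ hm)) (lt_irrefl _)

-- sorted of a duplicate-free list is strictly increasing
theorem sorted_nodup_pairwise_lt (xs : List String) (h : xs.Nodup) :
    (PySem.List.sorted xs (fun x => x) false).Pairwise (· < ·) := by
  have hle := PySem.List.sorted_pairwise (xs := xs) (key := fun x => x) (κ := String)
  have hnd : (PySem.List.sorted xs (fun x => x) false).Nodup :=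
    (PySem.List.sorted_perm xs (fun x => x) false).nodup_iff.mpr h
  refine (List.pairwise_iff_forall_sublist).mpr ?_
  intro a b hab
  have h1 := (List.pairwise_iff_forall_sublist).mp hle hab
  have h2 : a ≠ b := by
    intro rfl_eq
    subst rfl_eq
    exact (List.nodup_iff_sublist.mp hnd a) hab
  exact lt_of_le_of_ne h1 h2

-- ===== VERDICT (by name: the statement is the Claim_ definition above) =====
theorem Validado_spec : Claim_equal_Validado := by
  unfold Claim_equal_Validado
  intro alfabeto estados EstadoFinal regras _ hpre
  unfold Spec_Validado
  match estados with
  | [] => exact absurd rfl hpre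
  | e0 :: tl =>
    simp only [Validado, Validado_alt]
    by_cases hg : e0.length == 0
    · simp [hg]
    · simp only [hg, Bool.false_eq_true, if_false]
      have hndN : (regras.foldl (fun s r => PySem.Set.add (PySem.Set.add s r.1) r.2.2)
          (PySem.Set.ofList EstadoFinal)).Nodup :=
        nodup_needed _ _ (PySem.Set.nodup_ofList _)
      rw [vLoopFinais_eq, vLoopRegras_eq, Bool.eq_iff_iff,
        vMerge_iff _ _ (sorted_nodup_pairwise_lt _ hndN)
          (sorted_nodup_pairwise_lt _ (PySem.Set.nodup_ofList _))]
      simp only [Bool.and_eq_true, List.all_eq_true, decide_eq_true_eq,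
        PySem.List.mem_sorted, mem_needed, PySem.Set.mem_ofList]
      constructor
      · rintro ⟨hf, hr⟩ x hx
        rcases hx with hx | ⟨r, hrr, rfl | rfl⟩
        · exact hf x hx
        · exact (hr r hrr).1
        · exact (hr r hrr).2
      · intro h
        refine ⟨fun x hx => h x (Or.inl hx), ?_⟩
        intro r hrr
        exact ⟨h r.1 (Or.inr ⟨r, hrr, Or.inl rfl⟩), h r.2.2 (Or.inr ⟨r, hrr, Or.inr rfl⟩)⟩
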